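-- pv_equiv track=rewrite | github.com/osborn123/MCCProxy | src/main/ML/FeatureExtractor.py | get_num_steps_between_accesses
-- ===== SOURCE A (Python) =====
-- def get_num_steps_between_accesses(access_array, k):
--     distances = [0] * k
--     last_one_pos = -1
--     i = j = 0
--     while i < k and j < len(access_array):
--         mask = access_array[j]
--         while mask != 0 and i < k:
--             pos = trailing_zeros(mask) + j * 64
--             distances[i] = pos - last_one_pos
--             i += 1
--             last_one_pos = pos
--             mask &= mask - 1
--         j += 1
--     return distances
--
-- def trailing_zeros(x):
--     return (x & -x).bit_length() - 1
-- ===== SOURCE B (Python) =====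
-- def get_num_steps_between_accesses(access_array, k):
--     # Pass 1: collect the positions of the first k set bits.
--     positions = []
--     for j, word in enumerate(access_array):
--         mask = word
--         while mask != 0 and len(positions) < k:
--             positions.append(((mask & -mask).bit_length() - 1) + j * 64)
--             mask &= mask - 1
--         if len(positions) >= k:
--             break
--     # Pass 2: gaps = consecutive differences, with sentinel -1 before the first.
--     gaps = [cur - prev for prev, cur in zip([-1] + positions, positions)]
--     # Pad with zeros up to length k.
--     return gaps + [0] * (k - len(gaps))
-- ===== Notes on version B (the rewrite author's own statement) =====
-- stated objective: simpler
-- what changed: A's single fused loop that writes gaps into a preallocated length-k array via index/last-position state is replaced by two separate passes: first collect the first k set-bit positions into a list, then compute gaps by differencing consecutive positions (with -1 prepended) and pad with zeros to length k.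
import Mathlib
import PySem

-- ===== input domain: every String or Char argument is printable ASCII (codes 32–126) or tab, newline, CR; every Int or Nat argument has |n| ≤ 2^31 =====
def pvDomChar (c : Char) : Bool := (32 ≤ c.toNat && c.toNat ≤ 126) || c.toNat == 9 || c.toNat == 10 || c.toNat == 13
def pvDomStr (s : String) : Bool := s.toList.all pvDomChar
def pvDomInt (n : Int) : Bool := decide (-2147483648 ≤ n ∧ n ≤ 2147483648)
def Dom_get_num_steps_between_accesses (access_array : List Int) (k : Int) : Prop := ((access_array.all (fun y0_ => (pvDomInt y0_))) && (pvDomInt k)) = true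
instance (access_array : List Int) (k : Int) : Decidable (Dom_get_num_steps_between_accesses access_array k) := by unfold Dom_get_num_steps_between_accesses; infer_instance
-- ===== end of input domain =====

-- B replaces A's fused write-into-preallocated-array loop by two passes: collect the
-- first k set-bit positions, then difference consecutive positions and pad with zeros
-- (objective: simpler decomposition, same cost).

-- ===== PORT A =====

def trailing_zeros (x : Int) : Int :=
  (PySem.Int.bitLength (PySem.Int.band x (-x)) : Int) - 1

-- inner 'while mask != 0 and i < k' loop of A; returns (distances, i, last_one_pos)
def aInner (k j : Int) (mask i last : Int) (distances : List Int) :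
    List Int × Int × Int :=
  if _h : mask ≠ 0 ∧ i < k then
    let pos := trailing_zeros mask + j * 64
    aInner k j (PySem.Int.band mask (mask - 1)) (i + 1) pos (distances.set i.toNat (pos - last))
  else (distances, i, last)
termination_by (k - i).toNat
decreasing_by omega

-- outer 'while i < k and j < len(access_array)' loop of A
def aOuter (k : Int) (words : List Int) (j i last : Int) (distances : List Int) : List Int :=
  match words with
  | [] => distances
  | w :: ws =>
    if i < k then
      match aInner k j w i last distances with
      | (d, i', last') => aOuter k ws (j + 1) i' last' d
    else distances

def get_num_steps_between_accesses (access_array : List Int) (k : Int) : List Int :=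
  aOuter k access_array 0 0 (-1) (List.replicate k.toNat 0)

-- ===== PORT B =====

-- inner while of B: collect set-bit positions of one word while len(positions) < k
def bCollectWord (k j : Int) (mask : Int) (positions : List Int) : List Int :=
  if _h : mask ≠ 0 ∧ (positions.length : Int) < k then
    bCollectWord k j (PySem.Int.band mask (mask - 1))
      (positions ++ [(PySem.Int.bitLength (PySem.Int.band mask (-mask)) : Int) - 1 + j * 64])
  else positions
termination_by (k - positions.length).toNat
decreasing_by simp; omega

-- B's for loop over the words, with the early break
def bCollect (k : Int) (words : List Int) (j : Int) (positions : List Int) : List Int :=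
  match words with
  | [] => positions
  | w :: ws =>
    let ps := bCollectWord k j w positions
    if k ≤ (ps.length : Int) then ps else bCollect k ws (j + 1) ps

def get_num_steps_between_accesses_alt (access_array : List Int) (k : Int) : List Int :=
  let positions := bCollect k access_array 0 []
  let gaps := (List.zip ((-1) :: positions) positions).map (fun pc => pc.2 - pc.1)
  gaps ++ List.replicate (k - (gaps.length : Int)).toNat 0

-- ===== PRECONDITION & SPEC =====
def Spec_get_num_steps_between_accesses (access_array : List Int) (k : Int) (out : List Int) : Prop := out = get_num_steps_between_accesses_alt access_array k
instance (access_array : List Int) (k : Int) (out : List Int) : Decidable (Spec_get_num_steps_between_accesses access_array k out) := by unfold Spec_get_num_steps_between_accesses; infer_instance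

-- ===== CLAIM (what is proved, stated in full; the proofs are below) =====
def Claim_equal_get_num_steps_between_accesses : Prop := ∀ (access_array : List Int) (k : Int), Dom_get_num_steps_between_accesses access_array k → Spec_get_num_steps_between_accesses access_array k (get_num_steps_between_accesses access_array k)

-- ===== LEMMAS AND PROOFS =====

-- pure list of set-bit positions of one word, limited by a Nat budget
def posList (budget : Nat) (j mask : Int) : List Int :=
  match budget with
  | 0 => []
  | b + 1 =>
    if mask = 0 then []
    else (trailing_zeros mask + j * 64) :: posList b j (PySem.Int.band mask (mask - 1))

-- pure list of set-bit positions across the words, limited by a Nat budget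
def posAll (budget : Nat) (j : Int) (words : List Int) : List Int :=
  match words with
  | [] => []
  | w :: ws =>
    if budget = 0 then []
    else
      posList budget j w ++ posAll (budget - (posList budget j w).length) (j + 1) ws

-- A's write-the-gaps action, abstracted
def writeD (d : List Int) (i last : Int) (ps : List Int) : List Int :=
  match ps with
  | [] => d
  | p :: ps => writeD (d.set i.toNat (p - last)) (i + 1) p ps

-- consecutive differences starting from a previous value
def gapsFrom (last : Int) (ps : List Int) : List Int :=
  match ps with
  | [] => []
  | p :: ps => (p - last) :: gapsFrom p ps

theorem posList_length_le (budget : Nat) (j mask : Int) :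
    (posList budget j mask).length ≤ budget := by
  induction budget generalizing mask with
  | zero => simp [posList]
  | succ b ih => simp only [posList]; split <;> simp [ih]

theorem posAll_length_le (budget : Nat) (j : Int) (words : List Int) :
    (posAll budget j words).length ≤ budget := by
  induction words generalizing budget j with
  | nil => simp [posAll]
  | cons w ws ih =>
    simp only [posAll]
    split
    · simp
    · have h1 := posList_length_le budget j w
      have h2 := ih (budget - (posList budget j w).length) (j + 1)
      simp only [List.length_append]; omega

theorem writeD_append (ps qs : List Int) (d : List Int) (i last : Int) :
    writeD d i last (ps ++ qs) =
      writeD (writeD d i last ps) (i + ps.length) (ps.foldl (fun _ p => p) last) qs := by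
  induction ps generalizing d i last with
  | nil => simp [writeD]
  | cons p ps ih =>
    simp only [List.cons_append, writeD, List.foldl_cons, List.length_cons, ih]
    congr 1
    push_cast
    ring

theorem posAll_zero (j : Int) (words : List Int) : posAll 0 j words = [] := by
  cases words <;> simp [posAll]

theorem aInner_eq (k j : Int) (mask i last : Int) (d : List Int) :
    aInner k j mask i last d =
      (writeD d i last (posList (k - i).toNat j mask),
       i + (posList (k - i).toNat j mask).length,
       (posList (k - i).toNat j mask).foldl (fun _ p => p) last) := by
  fun_induction aInner k j mask i last d with
  | case1 mask i last d h pos ih =>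
    obtain ⟨hm, hik⟩ := h
    have hb : (k - i).toNat = (k - (i + 1)).toNat + 1 := by omega
    rw [hb]
    simp only [posList, if_neg hm, writeD, List.length_cons, List.foldl_cons, ih,
      Prod.mk.injEq]
    refine ⟨rfl, by push_cast; ring, rfl⟩
  | case2 mask i last d h =>
    have hb : posList (k - i).toNat j mask = [] := by
      rcases Decidable.em (mask = 0) with hm | hm
      · cases hn : (k - i).toNat <;> simp [posList, hm]
      · have : ¬ i < k := fun hik => h ⟨hm, hik⟩
        have : (k - i).toNat = 0 := by omega
        simp [this, posList]
    simp [hb, writeD]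

theorem bCollectWord_eq (k j mask : Int) (positions : List Int) :
    bCollectWord k j mask positions =
      positions ++ posList (k - positions.length).toNat j mask := by
  fun_induction bCollectWord k j mask positions with
  | case1 mask positions h ih =>
    obtain ⟨hm, hlk⟩ := h
    have hb : (k - positions.length).toNat = (k - (positions.length + 1)).toNat + 1 := by
      omega
    rw [hb]
    simp only [posList, if_neg hm]
    simp only [List.length_append, List.length_cons, List.length_nil] at ih
    rw [ih]
    simp only [trailing_zeros, List.append_assoc, List.singleton_append]
    norm_cast
  | case2 mask positions h =>
    have hb : posList (k - positions.length).toNat j mask = [] := by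
      rcases Decidable.em (mask = 0) with hm | hm
      · cases hn : (k - positions.length).toNat <;> simp [posList, hm]
      · have : ¬ (positions.length : Int) < k := fun hik => h ⟨hm, hik⟩
        have : (k - positions.length).toNat = 0 := by omega
        simp [this, posList]
    rw [hb, List.append_nil]

theorem aOuter_eq (k : Int) (words : List Int) (j i last : Int) (d : List Int) :
    aOuter k words j i last d = writeD d i last (posAll (k - i).toNat j words) := by
  induction words generalizing j i last d with
  | nil => simp [aOuter, posAll, writeD]
  | cons w ws ih =>
    simp only [aOuter]
    split
    · rename_i hik
      rw [aInner_eq]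
      simp only
      rw [ih]
      have hb0 : (k - i).toNat ≠ 0 := by omega
      have hlen := posList_length_le (k - i).toNat j w
      conv_rhs => rw [posAll]
      rw [if_neg hb0, writeD_append]
      congr 1
      congr 1
      omega
    · rename_i hik
      have hb : (k - i).toNat = 0 := by omega
      rw [hb, posAll_zero]
      rfl

theorem bCollect_eq (k : Int) (words : List Int) (j : Int) (positions : List Int) :
    bCollect k words j positions =
      positions ++ posAll (k - positions.length).toNat j words := by
  induction words generalizing j positions with
  | nil => simp [bCollect, posAll]
  | cons w ws ih =>
    simp only [bCollect, bCollectWord_eq]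
    have hlen := posList_length_le (k - positions.length).toNat j w
    split
    · rename_i hstop
      simp only [List.length_append] at hstop
      rcases Decidable.em ((k - positions.length).toNat = 0) with hb0 | hb0
      · rw [hb0]
        conv_rhs => rw [posAll]
        simp [posList]
      · conv_rhs => rw [posAll]
        rw [if_neg hb0]
        have : (k - positions.length).toNat - (posList (k - positions.length).toNat j w).length = 0 := by
          omega
        rw [this, posAll_zero]
        simp
    · rename_i hstop
      simp only [List.length_append] at hstop
      rw [ih]
      have hb0 : (k - positions.length).toNat ≠ 0 := by omega
      conv_rhs => rw [posAll]
      rw [if_neg hb0]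
      simp only [List.length_append, List.append_assoc]
      congr 2
      push_cast
      congr 1
      omega

theorem gaps_eq (positions : List Int) (a : Int) :
    (List.zip (a :: positions) positions).map (fun pc => pc.2 - pc.1) =
      gapsFrom a positions := by
  induction positions generalizing a with
  | nil => simp [gapsFrom]
  | cons p ps ih => simp [gapsFrom, ih]

theorem gapsFrom_length (last : Int) (ps : List Int) :
    (gapsFrom last ps).length = ps.length := by
  induction ps generalizing last with
  | nil => rfl
  | cons p ps ih => simp [gapsFrom, ih]

theorem writeD_eq (ps : List Int) (d : List Int) (i : Nat) (last : Int)
    (h : i + ps.length ≤ d.length) :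
    writeD d (i : Int) last ps =
      d.take i ++ gapsFrom last ps ++ d.drop (i + ps.length) := by
  induction ps generalizing d i last with
  | nil => simp [writeD, gapsFrom]
  | cons p ps ih =>
    simp only [List.length_cons] at h
    have hi : i < d.length := by omega
    simp only [writeD, Int.toNat_natCast, gapsFrom]
    have hcast : ((i : Int) + 1) = ((i + 1 : Nat) : Int) := by push_cast; ring
    rw [hcast, ih (d.set i (p - last)) (i + 1) p (by simp; omega)]
    rw [List.set_eq_take_cons_drop _ hi]
    have hlt : (List.take i d).length = i := by simp [List.length_take]; omega
    rw [List.take_append, List.drop_append, hlt]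
    have e1 : i + 1 - i = 1 := by omega
    have e2 : i + 1 + ps.length - i = ps.length + 1 := by omega
    rw [e1, e2]
    rw [List.take_take, Nat.min_eq_right (by omega)]
    have e4 : List.drop (i + 1 + ps.length) (List.take i d) = [] :=
      List.drop_eq_nil_of_le (by rw [hlt]; omega)
    rw [e4]
    simp only [List.take_succ_cons, List.take_zero, List.drop_succ_cons, List.drop_drop,
      List.nil_append, List.append_assoc, List.cons_append,
      List.length_cons]
    have e3 : i + 1 + ps.length = i + (ps.length + 1) := by omega
    rw [e3]

-- ===== VERDICT (by name: the statement is the Claim_ definition above) =====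
theorem get_num_steps_between_accesses_spec : Claim_equal_get_num_steps_between_accesses := by
  intro access_array k _
  unfold Spec_get_num_steps_between_accesses
  simp only [get_num_steps_between_accesses, get_num_steps_between_accesses_alt]
  rw [aOuter_eq, bCollect_eq, gaps_eq]
  simp only [List.nil_append, List.length_nil, Nat.cast_zero, Int.sub_zero]
  set P := posAll k.toNat 0 access_array with hP
  have hPle : P.length ≤ k.toNat := posAll_length_le _ _ _
  have h0 : ((0 : Int)) = ((0 : Nat) : Int) := rfl
  rw [h0, writeD_eq _ _ _ _ (by simp [List.length_replicate]; omega)]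
  simp [List.drop_replicate, gapsFrom_length]
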